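-- pv_equiv track=rewrite | github.com/ezzyoung/python_study | 프로그래머스/0/181881. 조건에 맞게 수열 변환하기 2/조건에 맞게 수열 변환하기 2.py | solution
-- ===== SOURCE A (Python) =====
-- def solution(arr):
--     x = 0
--     while True:
--         arr2 = []
--         for i in arr:
--             if i >= 50 and i%2==0:
--                 arr2.append(i//2)
--             elif i<=50 and i%2==1:
--                 arr2.append(i*2+1)
--             else:
--                 arr2.append(i)
--
--         if arr == arr2:
--             return x
--         arr = arr2 #갱신시킴
--         x+=1
-- ===== SOURCE B (Python) =====
-- def solution(arr):
--     best = 0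
--     for i in arr:
--         c = 0
--         while True:
--             if i >= 50 and i % 2 == 0:
--                 j = i // 2
--             elif i <= 50 and i % 2 == 1:
--                 j = i * 2 + 1
--             else:
--                 j = i
--             if j == i:
--                 break
--             i = j
--             c += 1
--         if c > best:
--             best = c
--     return best
-- ===== Notes on version B (the rewrite author's own statement) =====
-- stated objective: alternative
-- what changed: Replaces A's repeated whole-array passes (rebuilding the list and comparing it for equality each round) by one independent convergence loop per element plus a max reduction; Pre_ excludes arrays with an odd element below -1, on which A never returns (infinite loop).
import Mathlib
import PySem

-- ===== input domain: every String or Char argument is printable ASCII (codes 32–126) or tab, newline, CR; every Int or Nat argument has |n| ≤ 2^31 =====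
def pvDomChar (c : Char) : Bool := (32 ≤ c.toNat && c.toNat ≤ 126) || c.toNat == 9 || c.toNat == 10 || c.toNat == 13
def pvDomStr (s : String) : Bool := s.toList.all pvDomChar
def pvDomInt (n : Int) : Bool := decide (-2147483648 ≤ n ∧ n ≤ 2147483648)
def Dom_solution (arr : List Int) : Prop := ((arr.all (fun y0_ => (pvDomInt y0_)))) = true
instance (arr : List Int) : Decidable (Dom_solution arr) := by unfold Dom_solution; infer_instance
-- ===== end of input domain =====

-- B replaces A's repeated whole-array passes (with a list-equality test each pass) by one
-- independent convergence loop per element and a running maximum (objective: alternative).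

-- ===== PORT A =====
-- one pass of A's inner for-loop, building arr2 by appends
def pvPass (arr : List Int) : List Int :=
  arr.foldl (fun arr2 i =>
    if 50 ≤ i ∧ PySem.Int.mod i 2 = 0 then arr2 ++ [PySem.Int.floordiv i 2]
    else if i ≤ 50 ∧ PySem.Int.mod i 2 = 1 then arr2 ++ [i * 2 + 1]
    else arr2 ++ [i]) []

-- A's 'while True' loop; the fuel (100) is only a totality guard, never reached on Pre_ inputs
def pvLoopA : Nat → List Int → Int → Int
  | 0, _, x => x
  | n + 1, arr, x =>
    let arr2 := pvPass arr
    if arr = arr2 then x else pvLoopA n arr2 (x + 1)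

def solution (arr : List Int) : Int := pvLoopA 100 arr 0

-- ===== PORT B =====
-- B's inner 'while True' per-element loop; fuel is only a totality guard, never reached on Pre_ inputs
def pvElem : Nat → Int → Int → Int
  | 0, _, c => c
  | n + 1, i, c =>
    let j := if 50 ≤ i ∧ PySem.Int.mod i 2 = 0 then PySem.Int.floordiv i 2
             else if i ≤ 50 ∧ PySem.Int.mod i 2 = 1 then i * 2 + 1
             else i
    if j = i then c else pvElem n j (c + 1)

def solution_alt (arr : List Int) : Int :=
  arr.foldl (fun best i =>
    let c := pvElem 100 i 0
    if best < c then c else best) 0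

-- ===== PRECONDITION & SPEC =====
-- Pre_ excludes arrays containing an odd element below -1: on those A (and B) loop forever
-- (i*2+1 keeps such an element odd and negative and strictly shrinks it), so A never returns.
def Pre_solution (arr : List Int) : Prop :=
  ∀ i ∈ arr, PySem.Int.mod i 2 = 0 ∨ -1 ≤ i
instance (arr : List Int) : Decidable (Pre_solution arr) := by unfold Pre_solution; infer_instance

def pvWitness_solution : List Int := [51, -4, 100, 3, 0]

def Spec_solution (arr : List Int) (out : Int) : Prop := out = solution_alt arr
instance (arr : List Int) (out : Int) : Decidable (Spec_solution arr out) := by unfold Spec_solution; infer_instance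

-- ===== CLAIM (what is proved, stated in full; the proofs are below) =====
def Claim_equal_solution : Prop := ∀ (arr : List Int), Dom_solution arr → Pre_solution arr → Spec_solution arr (solution arr)

-- ===== LEMMAS AND PROOFS =====

-- the per-element transform both programs apply
def pvF (i : Int) : Int :=
  if 50 ≤ i ∧ PySem.Int.mod i 2 = 0 then PySem.Int.floordiv i 2
  else if i ≤ 50 ∧ PySem.Int.mod i 2 = 1 then i * 2 + 1
  else i

-- after n applications of pvF, i has converged
def pvSat (n : Nat) (i : Int) : Prop := pvF (pvF^[n] i) = pvF^[n] i

-- number of applications of pvF until convergence, fuel-bounded (B's inner-loop count)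
def pvNsteps : Nat → Int → Nat
  | 0, _ => 0
  | n + 1, i => if pvF i = i then 0 else pvNsteps n (pvF i) + 1

theorem pvPass_go (l : List Int) (acc : List Int) :
    l.foldl (fun arr2 i =>
      if 50 ≤ i ∧ PySem.Int.mod i 2 = 0 then arr2 ++ [PySem.Int.floordiv i 2]
      else if i ≤ 50 ∧ PySem.Int.mod i 2 = 1 then arr2 ++ [i * 2 + 1]
      else arr2 ++ [i]) acc = acc ++ l.map pvF := by
  induction l generalizing acc with
  | nil => simp
  | cons i l ih =>
    simp only [List.foldl_cons, List.map_cons]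
    rw [ih]
    unfold pvF
    split_ifs <;> simp

theorem pvPass_eq_map (arr : List Int) : pvPass arr = arr.map pvF := by
  unfold pvPass; simpa using pvPass_go arr []

theorem pvElem_eq (n : Nat) : ∀ (i : Int) (c : Int), pvElem n i c = c + (pvNsteps n i : Int) := by
  induction n with
  | zero => intro i c; simp [pvElem, pvNsteps]
  | succ n ih =>
    intro i c
    show (if pvF i = i then c else pvElem n (pvF i) (c + 1)) = _
    by_cases h : pvF i = i
    · simp [pvNsteps, h]
    · simp only [pvNsteps, if_neg h, ih (pvF i) (c + 1)]
      push_cast; ring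

theorem pvNsteps_fix {i : Int} (h : pvF i = i) (n : Nat) : pvNsteps n i = 0 := by
  cases n <;> simp [pvNsteps, h]

theorem pvSat_of_fix {i : Int} (h : pvF i = i) (n : Nat) : pvSat n i := by
  unfold pvSat; rw [Function.iterate_fixed h, h]

theorem pvSat_succ_of {n : Nat} {i : Int} (h : pvSat n (pvF i)) : pvSat (n + 1) i := by
  unfold pvSat at *
  rw [Function.iterate_succ_apply]
  exact h

theorem pvSat_succ {n : Nat} {i : Int} (h : pvSat n i) : pvSat (n + 1) i := by
  unfold pvSat at *
  rw [Function.iterate_succ_apply', h, h]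

theorem pvSat_mono {n m : Nat} {i : Int} (h : pvSat n i) (hnm : n ≤ m) : pvSat m i := by
  induction m with
  | zero =>
    have hn : n = 0 := by omega
    exact hn ▸ h
  | succ m ih =>
    rcases Nat.lt_or_ge n (m + 1) with hlt | hge
    · exact pvSat_succ (ih (by omega))
    · have : n = m + 1 := by omega
      exact this ▸ h

theorem pvSat_small : ∀ n : Nat, n < 64 → pvSat 6 ((n : Nat) : Int) := by
  have h : ∀ n : Nat, n < 64 → pvF (pvF^[6] ((n : Nat) : Int)) = pvF^[6] ((n : Nat) : Int) := by decide
  exact h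

theorem pvF_fix_neg {i : Int} (hneg : i < 0) (hg : PySem.Int.mod i 2 = 0 ∨ -1 ≤ i) :
    pvF i = i := by
  have hm := PySem.Int.mod_eq_emod_of_pos (a := i) (b := 2) (by norm_num)
  unfold pvF
  rcases hg with he | hge
  · rw [hm] at he
    rw [if_neg (by omega), if_neg (by rw [hm]; omega)]
  · have : i = -1 := by omega
    subst this
    norm_num [hm]

theorem pvF_fix_big_odd {i : Int} (h50 : 50 ≤ i) (hodd : PySem.Int.mod i 2 = 1) :
    pvF i = i := by
  have hm := PySem.Int.mod_eq_emod_of_pos (a := i) (b := 2) (by norm_num)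
  rw [hm] at hodd
  have : 50 < i := by omega
  unfold pvF
  rw [if_neg (by rw [hm]; omega), if_neg (by omega)]

theorem pvSat_pos : ∀ (n : Nat) (i : Int), 0 ≤ i → i < 2 ^ (n + 6) → pvSat (n + 6) i := by
  intro n
  induction n with
  | zero =>
    intro i h0 hlt
    have h1 : i = ((i.toNat : Nat) : Int) := by omega
    have h2 : i.toNat < 64 := by omega
    rw [h1]
    exact pvSat_small i.toNat h2
  | succ n ih =>
    intro i h0 hlt
    rcases Nat.lt_or_ge i.toNat 64 with hs | hb
    · have h1 : i = ((i.toNat : Nat) : Int) := by omega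
      rw [h1]
      exact pvSat_mono (pvSat_small i.toNat hs) (by omega)
    · have h64 : (64 : Int) ≤ i := by omega
      have hm := PySem.Int.mod_eq_emod_of_pos (a := i) (b := 2) (by norm_num)
      by_cases he : PySem.Int.mod i 2 = 0
      · -- even, halve
        have hf : pvF i = i / 2 := by
          unfold pvF
          rw [if_pos ⟨by omega, he⟩, PySem.Int.floordiv_eq_ediv_of_pos (by norm_num)]
        have hpow : (2 : Int) ^ (n + 1 + 6) = 2 * 2 ^ (n + 6) := by ring
        have h1 : 0 ≤ i / 2 := by omega
        have h2 : i / 2 < 2 ^ (n + 6) := by omega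
        have := ih (i / 2) h1 h2
        have : pvSat (n + 6 + 1) i := pvSat_succ_of (hf ▸ this)
        exact pvSat_mono this (by omega)
      · -- odd and ≥ 50: fixed
        have hodd : PySem.Int.mod i 2 = 1 := by rw [hm] at *; omega
        exact pvSat_of_fix (pvF_fix_big_odd (by omega) hodd) _
    
theorem pvSat_dom {i : Int} (hd : -2147483648 ≤ i ∧ i ≤ 2147483648)
    (hg : PySem.Int.mod i 2 = 0 ∨ -1 ≤ i) : pvSat 100 i := by
  rcases Int.lt_or_le i 0 with hneg | hpos
  · exact pvSat_of_fix (pvF_fix_neg hneg hg) _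
  · have hlt : i < 2 ^ (26 + 6) := by norm_num; omega
    exact pvSat_mono (pvSat_pos 26 i hpos hlt) (by omega)

theorem pvFoldlMax_zero (h : Int → Nat) : ∀ (l : List Int) (b : Nat), (∀ i ∈ l, h i = 0) →
    List.foldl (fun s i => max s (h i)) b l = b := by
  intro l
  induction l with
  | nil => intro b _; rfl
  | cons i l ih =>
    intro b hz
    simp only [List.foldl_cons, hz i (by simp), Nat.max_zero]
    exact ih b (fun j hj => hz j (by simp [hj]))

theorem pvFoldlMax_shift (u v : Int → Nat) : ∀ (l : List Int) (a b : Nat),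
    (∀ i ∈ l, (u i = 0 ∧ v i = 0) ∨ u i = v i + 1) →
    ((a = 0 ∧ b = 0) ∨ a = b + 1) →
    (a ≠ 0 ∨ ∃ i ∈ l, u i ≠ 0) →
    List.foldl (fun s i => max s (u i)) a l = List.foldl (fun s i => max s (v i)) b l + 1 := by
  intro l
  induction l with
  | nil =>
    intro a b _ hab hne
    simp only [List.foldl_nil]
    rcases hab with ⟨h0, _⟩ | h1
    · rcases hne with h | ⟨i, hi, _⟩
      · omega
      · simp at hi
    · exact h1
  | cons i l ih =>
    intro a b hp hab hne
    simp only [List.foldl_cons]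
    rcases hp i (by simp) with ⟨hu, hv⟩ | hs
    · rw [hu, hv]
      apply ih (max a 0) (max b 0) (fun j hj => hp j (by simp [hj]))
      · rcases hab with ⟨h, h'⟩ | h
        · left; simp [h, h']
        · right; simp [h]
      · rcases hne with h | ⟨j, hj, hju⟩
        · left; omega
        · rcases List.mem_cons.mp hj with rfl | hj'
          · omega
          · right; exact ⟨j, hj', hju⟩
    · rw [hs]
      apply ih _ _ (fun j hj => hp j (by simp [hj]))
      · right
        rcases hab with ⟨h, h'⟩ | h <;> omega
      · left; omega

-- the value B's fold computes, in Nat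
def pvMF (fuel : Nat) (arr : List Int) : Nat :=
  arr.foldl (fun s i => max s (pvNsteps fuel i)) 0

theorem pvMapEqSelf {f : Int → Int} : ∀ {l : List Int}, l.map f = l ↔ ∀ x ∈ l, f x = x := by
  intro l
  induction l with
  | nil => simp
  | cons a l ih => simp [ih]

theorem pvAllFix_of_pass_eq {arr : List Int} (h : arr = pvPass arr) :
    ∀ i ∈ arr, pvF i = i := by
  rw [pvPass_eq_map] at h
  intro i hi
  exact (pvMapEqSelf.mp h.symm) i hi

theorem pvLoopA_eq : ∀ (fuel : Nat) (arr : List Int) (x : Int),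
    (∀ i ∈ arr, pvSat fuel i) → pvLoopA fuel arr x = x + (pvMF fuel arr : Int) := by
  intro fuel
  induction fuel with
  | zero =>
    intro arr x _
    have : pvMF 0 arr = 0 := pvFoldlMax_zero _ arr 0 (fun i _ => rfl)
    simp [pvLoopA, this]
  | succ fuel ih =>
    intro arr x hsat
    show (if arr = pvPass arr then x else pvLoopA fuel (pvPass arr) (x + 1)) = _
    by_cases heq : arr = pvPass arr
    · rw [if_pos heq]
      have hfix := pvAllFix_of_pass_eq heq
      have : pvMF (fuel + 1) arr = 0 :=
        pvFoldlMax_zero _ arr 0 (fun i hi => pvNsteps_fix (hfix i hi) _)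
      simp [this]
    · rw [if_neg heq, pvPass_eq_map]
      have hsat' : ∀ j ∈ arr.map pvF, pvSat fuel j := by
        intro j hj
        rcases List.mem_map.mp hj with ⟨i, hi, rfl⟩
        have := hsat i hi
        unfold pvSat at *
        rwa [Function.iterate_succ_apply] at this
      rw [ih (arr.map pvF) (x + 1) hsat']
      have hMF : pvMF (fuel + 1) arr = pvMF fuel (arr.map pvF) + 1 := by
        unfold pvMF
        rw [List.foldl_map]
        apply pvFoldlMax_shift (fun i => pvNsteps (fuel + 1) i) (fun i => pvNsteps fuel (pvF i))
        · intro i hi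
          by_cases hfix : pvF i = i
          · left
            exact ⟨pvNsteps_fix hfix _, by rw [hfix]; exact pvNsteps_fix hfix _⟩
          · right
            simp [pvNsteps, hfix]
        · left; exact ⟨rfl, rfl⟩
        · right
          rw [pvPass_eq_map] at heq
          by_contra hall
          push Not at hall
          apply heq
          symm
          apply pvMapEqSelf.mpr
          intro i hi
          by_contra hfix
          have := hall i hi
          simp [pvNsteps, hfix] at this
      rw [hMF]
      push_cast; ring

theorem pvAlt_eq : ∀ (arr : List Int) (b : Nat),
    List.foldl (fun best i => let c := pvElem 100 i 0; if best < c then c else best) (b : Int) arr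
      = ((List.foldl (fun s i => max s (pvNsteps 100 i)) b arr : Nat) : Int) := by
  intro arr
  induction arr with
  | nil => intro b; rfl
  | cons i l ih =>
    intro b
    simp only [List.foldl_cons]
    have hc : pvElem 100 i 0 = ((pvNsteps 100 i : Nat) : Int) := by
      rw [pvElem_eq]; ring
    rw [hc]
    have : (if (b : Int) < (pvNsteps 100 i : Int) then ((pvNsteps 100 i : Nat) : Int) else (b : Int))
        = ((max b (pvNsteps 100 i) : Nat) : Int) := by
      split_ifs with h <;> push_cast <;> omega
    rw [this, ih]

-- ===== VERDICT (by name: the statement is the Claim_ definition above) =====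
theorem solution_spec : Claim_equal_solution := by
  intro arr hdom hpre
  unfold Spec_solution solution solution_alt
  have hsat : ∀ i ∈ arr, pvSat 100 i := by
    intro i hi
    apply pvSat_dom
    · have := List.all_eq_true.mp hdom i hi
      simpa [pvDomInt] using this
    · exact hpre i hi
  rw [pvLoopA_eq 100 arr 0 hsat]
  have h := pvAlt_eq arr 0
  simp only [Nat.cast_zero] at h
  rw [h]
  simp [pvMF]
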